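-- pv_equiv track=rewrite | github.com/kjh42447/Algorithm | 프로그래머스/LV1/크레인 영형뽑기 게임.py | solution
-- ===== SOURCE A (Python) =====
-- def solution(board, moves):
--     answer = 0
--     size = len(board)
--     basket = []
--     board_stack = [[] for i in range(size)]
--
--     for i in range(size):
--         for j in range(size):
--             if board[size-i-1][j] != 0:
--                 board_stack[j].append(board[size-i-1][j])
--
--     for move in moves:
--         if board_stack[move-1]:
--             grap = board_stack[move-1].pop()
--
--             if basket:
--                 if basket[-1] == grap:
--                     answer += 2
--                     basket.pop()
--                     continue
--
--             basket.append(grap)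
--
--     return answer
-- ===== SOURCE B (Python) =====
-- def solution(board, moves):
--     grid = [row[:] for row in board]
--     answer = 0
--     basket = []
--     for m in moves:
--         c = m - 1
--         for row in grid:
--             d = row[c]
--             if d != 0:
--                 row[c] = 0
--                 if basket and basket[-1] == d:
--                     basket.pop()
--                     answer += 2
--                 else:
--                     basket.append(d)
--                 break
--     return answer
-- ===== Notes on version B (the rewrite author's own statement) =====
-- stated objective: simpler
-- what changed: B drops A's precomputed per-column stacks entirely: it copies the board and, for each move, scans that column top-down for the first non-zero cell, grabs it and zeroes it in place, applying the same basket matching.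
-- outside the precondition, e.g. on solution([[0, 1, 5], [2, 3, 5]], [0, 0]): A returns 0, B returns 2
import Mathlib
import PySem

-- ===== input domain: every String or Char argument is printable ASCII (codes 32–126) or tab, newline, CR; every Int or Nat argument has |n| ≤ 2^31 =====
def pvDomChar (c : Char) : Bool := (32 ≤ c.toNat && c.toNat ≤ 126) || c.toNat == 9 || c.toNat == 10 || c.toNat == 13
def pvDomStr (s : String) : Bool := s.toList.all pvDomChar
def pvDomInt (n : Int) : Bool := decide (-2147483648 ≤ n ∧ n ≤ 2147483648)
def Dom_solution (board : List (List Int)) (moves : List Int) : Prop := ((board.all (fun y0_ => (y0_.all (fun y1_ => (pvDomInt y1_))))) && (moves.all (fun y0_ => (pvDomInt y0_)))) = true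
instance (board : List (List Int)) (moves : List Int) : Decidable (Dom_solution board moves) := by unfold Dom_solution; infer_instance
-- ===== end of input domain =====

-- B changes the algorithm (per-move top-down column scan on a board copy instead of A's
-- precomputed per-column stks); same basket logic, same return value on Pre_.

-- ===== PORT A =====
-- inner loop 'for j in range(size): if board[size-i-1][j] != 0: board_stack[j].append(...)'
def pvInnerA (board : List (List Int)) (size : Nat) (i : Nat) (st : List (List Int)) : List (List Int) :=
  (List.range size).foldl (fun st (j : Nat) =>
    let v := PySem.List.pyGetD (PySem.List.pyGetD board ((size : Int) - (i : Int) - 1) []) (j : Int) 0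
    if v ≠ 0 then PySem.List.pySetD st (j : Int) (PySem.List.pyGetD st (j : Int) [] ++ [v]) else st) st

-- body of 'for move in moves' (state: answer, basket, board_stack)
def pvStepA (acc : Int × List Int × List (List Int)) (move : Int) : Int × List Int × List (List Int) :=
  let answer := acc.1
  let basket := acc.2.1
  let st := acc.2.2
  let s := PySem.List.pyGetD st (move - 1) []
  if s ≠ [] then
    let grap := PySem.List.pyGetD s (-1) 0
    let st' := PySem.List.pySetD st (move - 1) s.dropLast
    (match basket.getLast? with
     | some t =>
       if t = grap then (answer + 2, basket.dropLast, st')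
       else (answer, basket ++ [grap], st')
     | none => (answer, basket ++ [grap], st'))
  else acc

def solution (board : List (List Int)) (moves : List Int) : Int :=
  let size := board.length
  let stks0 : List (List Int) := (List.range size).map (fun _ => ([] : List Int))
  let stks := (List.range size).foldl (fun st i => pvInnerA board size i st) stks0
  (moves.foldl pvStepA (0, ([] : List Int), stks)).1

-- ===== PORT B =====
-- inner 'for row in grid: d = row[c]; if d != 0: row[c] = 0; ...; break'
def pvGrab : List (List Int) → Int → Option (Int × List (List Int))
  | [], _ => none
  | row :: rs, c =>
    let d := PySem.List.pyGetD row c 0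
    if d ≠ 0 then some (d, PySem.List.pySetD row c 0 :: rs)
    else
      match pvGrab rs c with
      | some (d', rs') => some (d', row :: rs')
      | none => none

def pvStepB (acc : Int × List Int × List (List Int)) (m : Int) : Int × List Int × List (List Int) :=
  let answer := acc.1
  let basket := acc.2.1
  let grid := acc.2.2
  match pvGrab grid (m - 1) with
  | none => acc
  | some (d, grid') =>
    match basket.getLast? with
    | some t =>
      if t = d then (answer + 2, basket.dropLast, grid')
      else (answer, basket ++ [d], grid')
    | none => (answer, basket ++ [d], grid')

def solution_alt (board : List (List Int)) (moves : List Int) : Int :=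
  (moves.foldl pvStepB (0, ([] : List Int), board)).1

-- ===== PRECONDITION & SPEC =====
-- Pre_ excludes (a) inputs where A raises IndexError (a row shorter than the board height,
-- or a move whose 0-based index falls outside Python's negative-wraparound range), and
-- (b) non-positive moves on boards having a row wider than the board height, where A's
-- accidental negative-index wraparound (modulo the number of rows) and B's (modulo the
-- row width) pick different columns.
def Pre_solution (board : List (List Int)) (moves : List Int) : Prop :=
  (∀ row ∈ board, board.length ≤ row.length) ∧
  (∀ m ∈ moves, 1 - (board.length : Int) ≤ m ∧ m ≤ (board.length : Int)) ∧
  ((∀ m ∈ moves, 1 ≤ m) ∨ (∀ row ∈ board, row.length = board.length))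
instance (board : List (List Int)) (moves : List Int) : Decidable (Pre_solution board moves) := by
  unfold Pre_solution; infer_instance

def pvWitness_solution : List (List Int) × List Int := ([[0, 1], [2, 2]], [1, 2, 2])

def Spec_solution (board : List (List Int)) (moves : List Int) (out : Int) : Prop := out = solution_alt board moves
instance (board : List (List Int)) (moves : List Int) (out : Int) : Decidable (Spec_solution board moves out) := by unfold Spec_solution; infer_instance

-- ===== CLAIM (what is proved, stated in full; the proofs are below) =====
def Claim_equal_solution : Prop := ∀ (board : List (List Int)) (moves : List Int), Dom_solution board moves → Pre_solution board moves → Spec_solution board moves (solution board moves)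

-- ===== LEMMAS AND PROOFS =====

-- column j of the grid, top-down
def pvCol (grid : List (List Int)) (j : Nat) : List Int := grid.map (fun r => r.getD j 0)

-- A's stack for column j, as a function of the current grid
def pvStackOf (grid : List (List Int)) (j : Nat) : List Int :=
  ((pvCol grid j).filter (fun x => decide (x ≠ 0))).reverse

def pvStacksOf (size : Nat) (grid : List (List Int)) : List (List Int) :=
  (List.range size).map (fun j => pvStackOf grid j)

-- what one pass of A's inner loop does to column j's stack, given the row r
def pvG (r : List Int) (j : Nat) (s : List Int) : List Int :=
  if r.getD j 0 ≠ 0 then s ++ [r.getD j 0] else s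

theorem pv_getD_append_len {α : Type} (xs ys : List α) (y d : α) (n : Nat)
    (h : xs.length = n) : ((xs ++ y :: ys).getD n d) = y := by
  subst h
  simp [List.getD_eq_getElem?_getD]

theorem pv_inner_core (r : List Int) : ∀ (n : Nat) (st : List (List Int)), n ≤ st.length →
    (List.range n).foldl (fun st j =>
        if r.getD j 0 ≠ 0 then st.set j (st.getD j [] ++ [r.getD j 0]) else st) st
    = ((List.range n).map (fun j => pvG r j (st.getD j []))) ++ st.drop n := by
  intro n
  induction n with
  | zero => intro st _; simp
  | succ n ih =>
    intro st hle
    have hn : n < st.length := by omega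
    rw [List.range_succ, List.foldl_append, ih st (by omega), List.foldl_cons, List.foldl_nil]
    set mp := (List.range n).map (fun j => pvG r j (st.getD j [])) with hmp
    have hmplen : mp.length = n := by simp [hmp]
    have hdrop : st.drop n = st[n] :: st.drop (n + 1) := List.drop_eq_getElem_cons hn
    have hgetD : (mp ++ st.drop n).getD n [] = st[n] := by
      rw [hdrop]; exact pv_getD_append_len _ _ _ _ n hmplen
    have hset : ∀ v, (mp ++ st.drop n).set n v = mp ++ v :: st.drop (n + 1) := by
      intro v
      rw [hdrop, List.set_append, if_neg (by simp [hmplen])]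
      simp only [hmplen, Nat.sub_self]
      rfl
    have hstn : st.getD n [] = st[n] := List.getD_eq_getElem st [] hn
    rw [List.map_append, List.map_cons, List.map_nil, List.append_assoc]
    simp only [List.singleton_append]
    by_cases hv : r.getD n 0 ≠ 0
    · have hg2 : pvG r n (st.getD n []) = st[n] ++ [r.getD n 0] := by
        unfold pvG; rw [if_pos hv, hstn]
      rw [if_pos hv, hgetD, hset, hg2]
    · have hg2 : pvG r n (st.getD n []) = st[n] := by
        unfold pvG; rw [if_neg hv, hstn]
      rw [if_neg hv, hdrop, hg2]

theorem pv_inner_eq (board : List (List Int)) (size i : Nat) (st : List (List Int))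
    (hst : st.length = size) (hi : i < size) :
    pvInnerA board size i st
      = (List.range size).map (fun j => pvG (board.getD (size - 1 - i) []) j (st.getD j [])) := by
  unfold pvInnerA
  have hcast : (size : Int) - (i : Int) - 1 = ((size - 1 - i : Nat) : Int) := by omega
  simp only [hcast, PySem.List.pyGetD_natCast, PySem.List.pySetD_natCast]
  rw [pv_inner_core (board.getD (size - 1 - i) []) size st (by omega)]
  have hdrop0 : List.drop size st = [] := by
    rw [← hst]; exact List.drop_length
  rw [hdrop0, List.append_nil]

theorem pv_build_aux (board : List (List Int)) :
    ∀ i, i ≤ board.length →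
    (List.range i).foldl (fun st k => pvInnerA board board.length k st)
        ((List.range board.length).map (fun _ => ([] : List Int)))
      = pvStacksOf board.length (board.drop (board.length - i)) := by
  intro i
  induction i with
  | zero =>
    intro _
    simp [pvStacksOf, pvStackOf, pvCol]
  | succ i ih =>
    intro hle
    set n := board.length with hn
    rw [List.range_succ, List.foldl_append, ih (by omega), List.foldl_cons, List.foldl_nil]
    rw [pv_inner_eq board n i _ (by simp [pvStacksOf]) (by omega)]
    have hidx : n - 1 - i < n := by omega
    have hdrop : board.drop (n - (i + 1)) = board[n - 1 - i] :: board.drop (n - i) := by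
      have h1 : n - (i + 1) = n - 1 - i := by omega
      have h2 : n - 1 - i + 1 = n - i := by omega
      rw [h1, List.drop_eq_getElem_cons hidx, h2]
    have hget : board.getD (n - 1 - i) [] = board[n - 1 - i] := List.getD_eq_getElem board [] hidx
    rw [hdrop, hget]
    unfold pvStacksOf
    apply List.map_congr_left
    intro j hj
    rw [PySem.List.getD_map_range _ _ _ _ (List.mem_range.mp hj)]
    have hcolc : pvCol (board[n - 1 - i] :: board.drop (n - i)) j
        = board[n - 1 - i].getD j 0 :: pvCol (board.drop (n - i)) j := rfl
    unfold pvG pvStackOf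
    rw [hcolc, List.filter_cons]
    by_cases hv : board[n - 1 - i].getD j 0 ≠ 0
    · rw [if_pos hv, if_pos (by simpa using hv), List.reverse_cons]
    · rw [if_neg hv, if_neg (by simpa using hv)]

theorem pv_build_eq (board : List (List Int)) :
    (List.range board.length).foldl (fun st i => pvInnerA board board.length i st)
      ((List.range board.length).map (fun _ => ([] : List Int)))
    = pvStacksOf board.length board := by
  have h := pv_build_aux board board.length (Nat.le_refl _)
  simpa using h

theorem pv_pySetD_neg {α : Type} (xs : List α) (k : Nat) (v : α) (h1 : 0 < k)
    (h2 : k ≤ xs.length) : PySem.List.pySetD xs (-(k : Int)) v = xs.set (xs.length - k) v := by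
  simp only [PySem.List.pySetD, PySem.List.pySet?, PySem.List.pyIdx?]
  rw [if_neg (by omega), if_pos (by omega)]
  simp

-- resolution of Python's (possibly negative) index m-1 to the Nat column index j
theorem pv_res_getD {α : Type} (xs : List α) (d : α) (m : Int) (size j : Nat) (hjs : j < size)
    (hres : m - 1 = (j : Int) ∨ (¬ 1 ≤ m ∧ (j : Int) = m - 1 + (size : Int) ∧ xs.length = size)) :
    PySem.List.pyGetD xs (m - 1) d = xs.getD j d := by
  rcases hres with h | ⟨hm, hj, hlen⟩
  · rw [h, PySem.List.pyGetD_natCast]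
  · have hk1 : 0 < (1 - m).toNat := by omega
    have hkm : m - 1 = -(((1 - m).toNat : Nat) : Int) := by omega
    have hk2 : (1 - m).toNat ≤ xs.length := by omega
    rw [hkm, PySem.List.pyGetD_neg_natCast xs (1 - m).toNat d hk1 hk2]
    have hidx : xs.length - (1 - m).toNat = j := by omega
    rw [List.getD_eq_getElem xs d (by omega)]
    simp only [hidx]

theorem pv_res_setD {α : Type} (xs : List α) (v : α) (m : Int) (size j : Nat) (hjs : j < size)
    (hres : m - 1 = (j : Int) ∨ (¬ 1 ≤ m ∧ (j : Int) = m - 1 + (size : Int) ∧ xs.length = size)) :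
    PySem.List.pySetD xs (m - 1) v = xs.set j v := by
  rcases hres with h | ⟨hm, hj, hlen⟩
  · rw [h, PySem.List.pySetD_natCast]
  · have hk1 : 0 < (1 - m).toNat := by omega
    have hkm : m - 1 = -(((1 - m).toNat : Nat) : Int) := by omega
    have hk2 : (1 - m).toNat ≤ xs.length := by omega
    rw [hkm, pv_pySetD_neg xs (1 - m).toNat v hk1 hk2]
    have hidx : xs.length - (1 - m).toNat = j := by omega
    rw [hidx]

theorem pv_grab_cases : ∀ (grid : List (List Int)) (c : Int) (j : Nat),
    (∀ r ∈ grid, j < r.length ∧ PySem.List.pyGetD r c 0 = r.getD j 0 ∧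
      PySem.List.pySetD r c 0 = r.set j 0) →
    (pvGrab grid c = none ∧ (pvCol grid j).filter (fun x => decide (x ≠ 0)) = []) ∨
    (∃ d grid', pvGrab grid c = some (d, grid') ∧
      (pvCol grid j).filter (fun x => decide (x ≠ 0))
        = d :: ((pvCol grid' j).filter (fun x => decide (x ≠ 0))) ∧
      (∀ k, k ≠ j → pvCol grid' k = pvCol grid k) ∧
      grid'.map List.length = grid.map List.length) := by
  intro grid
  induction grid with
  | nil =>
    intro c j _
    left
    simp [pvGrab, pvCol]
  | cons row rs ih =>
    intro c j h
    obtain ⟨hjr, hgetr, hsetr⟩ := h row (by simp)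
    have hcol : pvCol (row :: rs) j = row.getD j 0 :: pvCol rs j := rfl
    have hgrabeq : pvGrab (row :: rs) c =
        (if row.getD j 0 ≠ 0 then some (row.getD j 0, row.set j 0 :: rs)
         else match pvGrab rs c with
              | some (d', rs') => some (d', row :: rs')
              | none => none) := by
      simp only [pvGrab]
      rw [hgetr, hsetr]
    by_cases hv : row.getD j 0 ≠ 0
    · right
      refine ⟨row.getD j 0, row.set j 0 :: rs, ?_, ?_, ?_, ?_⟩
      · rw [hgrabeq, if_pos hv]
      · have hz : (row.set j 0).getD j 0 = 0 := by
          rw [List.getD_eq_getElem _ _ (by simpa using hjr)]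
          exact List.getElem_set_self _
        have hcol' : pvCol (row.set j 0 :: rs) j = 0 :: pvCol rs j := by
          have : pvCol (row.set j 0 :: rs) j = (row.set j 0).getD j 0 :: pvCol rs j := rfl
          rw [this, hz]
        rw [hcol, hcol', List.filter_cons, List.filter_cons]
        rw [if_pos (by simpa using hv), if_neg (by simp)]
      · intro k hk
        have hsetk : (row.set j 0).getD k 0 = row.getD k 0 := by
          rw [List.getD_eq_getElem?_getD, List.getD_eq_getElem?_getD,
            List.getElem?_set_ne (Ne.symm hk)]
        have h1 : pvCol (row.set j 0 :: rs) k = (row.set j 0).getD k 0 :: pvCol rs k := rfl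
        have h2 : pvCol (row :: rs) k = row.getD k 0 :: pvCol rs k := rfl
        rw [h1, h2, hsetk]
      · simp
    · have hrs := ih c j (fun r hr => h r (List.mem_cons_of_mem _ hr))
      rcases hrs with ⟨hnone, hfil⟩ | ⟨d, rs', hsome, hfil, hcols, hlen⟩
      · left
        constructor
        · rw [hgrabeq, if_neg hv, hnone]
        · rw [hcol, List.filter_cons, if_neg (by simpa using hv)]
          exact hfil
      · right
        refine ⟨d, row :: rs', ?_, ?_, ?_, ?_⟩
        · rw [hgrabeq, if_neg hv, hsome]
        · have hcolr : pvCol (row :: rs') j = row.getD j 0 :: pvCol rs' j := rfl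
          rw [hcol, hcolr, List.filter_cons, List.filter_cons]
          rw [if_neg (by simpa using hv), if_neg (by simpa using hv)]
          exact hfil
        · intro k hk
          have h1 : pvCol (row :: rs') k = row.getD k 0 :: pvCol rs' k := rfl
          have h2 : pvCol (row :: rs) k = row.getD k 0 :: pvCol rs k := rfl
          rw [h1, h2, hcols k hk]
        · simp only [List.map_cons, hlen]

theorem pv_step_eq (size : Nat) (m : Int) (j : Nat) (ans : Int) (basket : List Int)
    (grid : List (List Int)) (hjs : j < size) (hg : ∀ r ∈ grid, size ≤ r.length)
    (hOr : m - 1 = (j : Int) ∨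
      (¬ 1 ≤ m ∧ (j : Int) = m - 1 + (size : Int) ∧ ∀ r ∈ grid, r.length = size)) :
    pvStepA (ans, basket, pvStacksOf size grid) m
        = ((pvStepB (ans, basket, grid) m).1, (pvStepB (ans, basket, grid) m).2.1,
            pvStacksOf size (pvStepB (ans, basket, grid) m).2.2)
      ∧ (pvStepB (ans, basket, grid) m).2.2.map List.length = grid.map List.length := by
  have hresS : ∀ (xs : List (List Int)), xs.length = size →
      (m - 1 = (j : Int) ∨ (¬ 1 ≤ m ∧ (j : Int) = m - 1 + (size : Int) ∧ xs.length = size)) := by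
    intro xs hlen
    rcases hOr with h | ⟨h1, h2, _⟩
    · exact Or.inl h
    · exact Or.inr ⟨h1, h2, hlen⟩
  have hstkLen : (pvStacksOf size grid).length = size := by simp [pvStacksOf]
  have hs : PySem.List.pyGetD (pvStacksOf size grid) (m - 1) [] = pvStackOf grid j := by
    rw [pv_res_getD _ [] m size j hjs (hresS _ hstkLen)]
    exact PySem.List.getD_map_range _ _ _ _ hjs
  have hrow : ∀ r ∈ grid, j < r.length ∧ PySem.List.pyGetD r (m - 1) 0 = r.getD j 0 ∧
      PySem.List.pySetD r (m - 1) 0 = r.set j 0 := by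
    intro r hr
    have hres : m - 1 = (j : Int) ∨
        (¬ 1 ≤ m ∧ (j : Int) = m - 1 + (size : Int) ∧ r.length = size) := by
      rcases hOr with h | ⟨h1, h2, h3⟩
      · exact Or.inl h
      · exact Or.inr ⟨h1, h2, h3 r hr⟩
    exact ⟨lt_of_lt_of_le hjs (hg r hr), pv_res_getD r 0 m size j hjs hres,
      pv_res_setD r 0 m size j hjs hres⟩
  rcases pv_grab_cases grid (m - 1) j hrow with
    ⟨hnone, hfil⟩ | ⟨d, grid', hsome, hfil, hcols, hlen⟩
  · -- column empty: both skip
    have hsA : pvStackOf grid j = [] := by rw [pvStackOf, hfil]; rfl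
    have hA : pvStepA (ans, basket, pvStacksOf size grid) m
        = (ans, basket, pvStacksOf size grid) := by
      simp only [pvStepA, hs, hsA]
      simp
    have hB : pvStepB (ans, basket, grid) m = (ans, basket, grid) := by
      simp only [pvStepB, hnone]
    refine ⟨?_, ?_⟩
    · rw [hA, hB]
    · rw [hB]
  · -- grab d from column j
    have hsA : pvStackOf grid j
        = ((pvCol grid' j).filter (fun x => decide (x ≠ 0))).reverse ++ [d] := by
      rw [pvStackOf, hfil, List.reverse_cons]
    have hstacks : (pvStacksOf size grid).set j
          (((pvCol grid' j).filter (fun x => decide (x ≠ 0))).reverse)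
        = pvStacksOf size grid' := by
      apply List.ext_getElem
      · simp [pvStacksOf]
      · intro k hk1 hk2
        have hkn : k < size := by simpa [pvStacksOf] using hk2
        rw [List.getElem_set]
        by_cases hkj : j = k
        · subst hkj
          rw [if_pos rfl]
          simp [pvStacksOf, pvStackOf]
        · rw [if_neg hkj]
          simp only [pvStacksOf, List.getElem_map, List.getElem_range]
          rw [pvStackOf, pvStackOf, hcols k (fun hx => hkj hx.symm)]
    have hset : PySem.List.pySetD (pvStacksOf size grid) (m - 1)
          ((pvStackOf grid j).dropLast) = pvStacksOf size grid' := by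
      rw [pv_res_setD _ _ m size j hjs (hresS _ hstkLen), hsA, List.dropLast_concat, hstacks]
    have hgrap : PySem.List.pyGetD (pvStackOf grid j) (-1) 0 = d := by
      rw [hsA]; exact PySem.List.pyGetD_neg_one_append_singleton _ _ _
    have hne : pvStackOf grid j ≠ [] := by rw [hsA]; simp
    have hA : pvStepA (ans, basket, pvStacksOf size grid) m
        = (match basket.getLast? with
           | some t => if t = d then (ans + 2, basket.dropLast, pvStacksOf size grid')
                       else (ans, basket ++ [d], pvStacksOf size grid')
           | none => (ans, basket ++ [d], pvStacksOf size grid')) := by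
      simp only [pvStepA, hs, hgrap, hset, if_pos hne]
    have hB : pvStepB (ans, basket, grid) m
        = (match basket.getLast? with
           | some t => if t = d then (ans + 2, basket.dropLast, grid')
                       else (ans, basket ++ [d], grid')
           | none => (ans, basket ++ [d], grid')) := by
      simp only [pvStepB, hsome]
    refine ⟨?_, ?_⟩
    · rw [hA, hB]
      cases basket.getLast? with
      | none => rfl
      | some t =>
        by_cases ht : t = d
        · simp [ht]
        · simp [ht]
    · rw [hB]
      cases basket.getLast? with
      | none => exact hlen
      | some t =>
        by_cases ht : t = d
        · simpa [ht] using hlen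
        · simpa [ht] using hlen

theorem pv_len_pres {grid grid' : List (List Int)}
    (h : grid'.map List.length = grid.map List.length) (P : Nat → Prop)
    (hg : ∀ r ∈ grid, P r.length) : ∀ r ∈ grid', P r.length := by
  intro r hr
  have hmem : r.length ∈ grid'.map List.length := List.mem_map_of_mem hr
  rw [h] at hmem
  rcases List.mem_map.mp hmem with ⟨r0, hr0, hr0len⟩
  rw [← hr0len]
  exact hg r0 hr0

theorem pv_loop_eq (size : Nat) : ∀ (moves : List Int) (ans : Int) (basket : List Int)
    (grid : List (List Int)), (∀ r ∈ grid, size ≤ r.length) →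
    (∀ m ∈ moves, 1 - (size : Int) ≤ m ∧ m ≤ (size : Int)) →
    ((∀ m ∈ moves, 1 ≤ m) ∨ (∀ r ∈ grid, r.length = size)) →
    (moves.foldl pvStepA (ans, basket, pvStacksOf size grid)).1
      = (moves.foldl pvStepB (ans, basket, grid)).1 := by
  intro moves
  induction moves with
  | nil => intro ans basket grid _ _ _; rfl
  | cons m ms ih =>
    intro ans basket grid hg hm hmix
    have hm1 := hm m (by simp)
    have hsize : 0 < size := by omega
    have hOr : ∃ j : Nat, j < size ∧ (m - 1 = (j : Int) ∨
        (¬ 1 ≤ m ∧ (j : Int) = m - 1 + (size : Int) ∧ ∀ r ∈ grid, r.length = size)) := by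
      by_cases hp : 1 ≤ m
      · exact ⟨(m - 1).toNat, by omega, Or.inl (by omega)⟩
      · have hsq : ∀ r ∈ grid, r.length = size := by
          rcases hmix with hall | hsq
          · exact absurd (hall m (by simp)) hp
          · exact hsq
        exact ⟨(m - 1 + size).toNat, by omega, Or.inr ⟨hp, by omega, hsq⟩⟩
    obtain ⟨j, hjs, hres⟩ := hOr
    obtain ⟨hstep, hlenp⟩ := pv_step_eq size m j ans basket grid hjs hg hres
    rw [List.foldl_cons, List.foldl_cons, hstep]
    refine ih _ _ _ (pv_len_pres hlenp (fun n => size ≤ n) hg) (fun x hx => hm x (by simp [hx])) ?_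
    rcases hmix with hall | hsq
    · exact Or.inl (fun x hx => hall x (by simp [hx]))
    · exact Or.inr (pv_len_pres hlenp (fun n => n = size) hsq)

-- ===== VERDICT (by name: the statement is the Claim_ definition above) =====
theorem solution_spec : Claim_equal_solution := by
  intro board moves _ hpre
  unfold Spec_solution solution solution_alt
  dsimp only
  rw [pv_build_eq board]
  exact pv_loop_eq board.length moves 0 [] board hpre.1 hpre.2.1 hpre.2.2
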